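-- pv_equiv track=rewrite | github.com/V4UIDev/backend-training | chungusnator.py | chungus_write
-- ===== SOURCE A (Python) =====
-- def chungus_write(chungusSize):
--     chungusWrite = "BIG "
--     while True:
--         if chungusSize > 1:
--             chungusWrite = chungusWrite + "BIG "
--             chungusSize = chungusSize - 1
--         else:
--             chungusWrite = chungusWrite + "CHUNGUS"
--             return chungusWrite
-- ===== SOURCE B (Python) =====
-- def chungus_write(chungusSize):
--     return "BIG " * max(1, chungusSize) + "CHUNGUS"
-- ===== Notes on version B (the rewrite author's own statement) =====
-- stated objective: simpler
-- what changed: Replaced the decrementing while-loop that concatenates 'BIG ' one block at a time with the closed-form string repetition 'BIG ' * max(1, chungusSize) + 'CHUNGUS'.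
import Mathlib
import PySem

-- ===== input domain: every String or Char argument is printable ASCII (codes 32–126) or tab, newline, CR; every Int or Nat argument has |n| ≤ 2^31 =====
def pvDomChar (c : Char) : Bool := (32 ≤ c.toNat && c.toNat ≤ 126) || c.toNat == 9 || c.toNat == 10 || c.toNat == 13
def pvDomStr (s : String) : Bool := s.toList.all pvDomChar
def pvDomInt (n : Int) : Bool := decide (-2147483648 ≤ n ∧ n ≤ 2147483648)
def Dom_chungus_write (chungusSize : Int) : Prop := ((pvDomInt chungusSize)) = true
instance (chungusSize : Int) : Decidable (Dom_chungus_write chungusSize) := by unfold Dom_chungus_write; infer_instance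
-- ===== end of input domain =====

-- B replaces A's decrementing concatenation loop with the closed form "BIG " * max(1, n) + "CHUNGUS" (objective: simpler).

-- ===== PORT A =====
-- the while-loop: state is (chungusSize, chungusWrite); decreases on chungusSize.toNat
def chungusLoop (chungusSize : Int) (chungusWrite : String) : String :=
  if chungusSize > 1 then
    chungusLoop (chungusSize - 1) (chungusWrite ++ "BIG ")
  else
    chungusWrite ++ "CHUNGUS"
termination_by chungusSize.toNat
decreasing_by omega

def chungus_write (chungusSize : Int) : String :=
  chungusLoop chungusSize "BIG "

-- ===== PORT B =====
-- "BIG " * max(1, chungusSize) + "CHUNGUS"; Python's str * int with a nonpositive count is "" ,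
-- but max(1, n) ≥ 1 so toNat is exact here.
def chungus_write_alt (chungusSize : Int) : String :=
  String.join (List.replicate (max 1 chungusSize).toNat "BIG ") ++ "CHUNGUS"

-- ===== PRECONDITION & SPEC =====
def Spec_chungus_write (chungusSize : Int) (out : String) : Prop := out = chungus_write_alt chungusSize
instance (chungusSize : Int) (out : String) : Decidable (Spec_chungus_write chungusSize out) := by unfold Spec_chungus_write; infer_instance

-- ===== CLAIM (what is proved, stated in full; the proofs are below) =====
def Claim_equal_chungus_write : Prop := ∀ (chungusSize : Int), Dom_chungus_write chungusSize → Spec_chungus_write chungusSize (chungus_write chungusSize)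

-- ===== LEMMAS AND PROOFS =====

-- String.join distributes over cons
theorem pv_foldl_append (l : List String) (a : String) :
    List.foldl (fun r s => r ++ s) a l = a ++ List.foldl (fun r s => r ++ s) "" l := by
  induction l generalizing a with
  | nil => simp
  | cons x xs ih =>
    simp only [List.foldl_cons]
    rw [ih (a ++ x), ih ("" ++ x)]
    simp [String.append_assoc]

theorem pv_join_cons (s : String) (l : List String) :
    String.join (s :: l) = s ++ String.join l := by
  simp only [String.join, List.foldl_cons]
  rw [pv_foldl_append l ("" ++ s)]
  simp

-- the loop appends (n-1).toNat copies of "BIG " then "CHUNGUS"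
theorem chungusLoop_eq (n : Int) (acc : String) :
    chungusLoop n acc = acc ++ String.join (List.replicate (n - 1).toNat "BIG ") ++ "CHUNGUS" := by
  induction n, acc using chungusLoop.induct with
  | case1 n acc h ih =>
    rw [chungusLoop, if_pos h, ih]
    have : (n - 1).toNat = (n - 1 - 1).toNat + 1 := by omega
    rw [this, List.replicate_succ, pv_join_cons]
    simp [String.append_assoc]
  | case2 n acc h =>
    rw [chungusLoop, if_neg h]
    have : (n - 1).toNat = 0 := by omega
    simp [this, String.join]

-- ===== VERDICT (by name: the statement is the Claim_ definition above) =====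
theorem chungus_write_spec : Claim_equal_chungus_write := by
  intro n _
  unfold Spec_chungus_write chungus_write chungus_write_alt
  rw [chungusLoop_eq]
  have : (max 1 n).toNat = (n - 1).toNat + 1 := by omega
  rw [this, List.replicate_succ, pv_join_cons]
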